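-- pv_equiv track=rewrite | github.com/PKStuff/task | HackerrRank/exam_score.py | func
-- ===== SOURCE A (Python) =====
-- def func(answered, needed, q):
--     a = [i-j if i>=i else 0 for i,j in zip(needed, answered)]
--     count = 0
--     for k in sorted(a):
--         if q >= k:
--             count+=1
--         else:
--             break
--         q-=k
--
--     return count
-- ===== SOURCE B (Python) =====
-- def func(answered, needed, q):
--     deltas = [n - a for n, a in zip(needed, answered)]
--     count = 0
--     while deltas:
--         m = min(deltas)
--         if q < m:
--             break
--         q -= m
--         count += 1
--         deltas.remove(m)
--     return count
-- ===== Notes on version B (the rewrite author's own statement) =====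
-- stated objective: alternative
-- what changed: Drops the sort entirely: B greedily extracts the minimum delta one at a time (min + remove on the live list) until the cheapest remaining delta exceeds the budget, instead of A's sort-then-scan-with-break loop.
import Mathlib
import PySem

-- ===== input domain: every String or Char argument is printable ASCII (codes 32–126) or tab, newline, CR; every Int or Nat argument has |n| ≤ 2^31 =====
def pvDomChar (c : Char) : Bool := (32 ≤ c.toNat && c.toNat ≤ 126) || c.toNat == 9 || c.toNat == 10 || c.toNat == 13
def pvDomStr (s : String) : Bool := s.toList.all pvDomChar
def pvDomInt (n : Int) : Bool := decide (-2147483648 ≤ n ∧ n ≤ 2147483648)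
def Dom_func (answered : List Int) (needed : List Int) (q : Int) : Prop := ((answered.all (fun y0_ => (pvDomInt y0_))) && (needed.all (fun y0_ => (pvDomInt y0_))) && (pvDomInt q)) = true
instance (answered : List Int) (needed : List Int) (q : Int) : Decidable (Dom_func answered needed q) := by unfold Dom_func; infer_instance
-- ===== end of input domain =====

-- B drops the sort: a selection-based greedy that repeatedly extracts the minimum delta via min/remove until the cheapest remaining delta exceeds the budget (alternative algorithm; return value only — B mutates its local list, not the arguments).


-- ===== PORT A =====
-- A's loop: for k in sorted(a): if q >= k: count += 1 else: break; q -= k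
def funcLoopA : List Int → Int → Int → Int
  | [], _, count => count
  | k :: rest, q, count => if q ≥ k then funcLoopA rest (q - k) (count + 1) else count

def func (answered : List Int) (needed : List Int) (q : Int) : Int :=
  let a := (needed.zip answered).map (fun p => if p.1 ≥ p.1 then p.1 - p.2 else 0)
  funcLoopA (PySem.List.sorted a (fun x => x) false) q 0

-- ===== PORT B =====
-- B's while loop: m = min(deltas); stop if q < m; else q -= m, count += 1, deltas.remove(m).
-- Fuel = initial length of deltas; each pass removes one element, so the fuel suffices.
def funcLoopB : Nat → List Int → Int → Int → Int
  | 0, _, _, count => count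
  | fuel + 1, deltas, q, count =>
    match PySem.List.min? deltas (fun x => x) with
    | none => count                       -- deltas empty: while loop ends
    | some m =>
      if q < m then count                 -- break
      else
        match PySem.List.remove? deltas m with
        | some rest => funcLoopB fuel rest (q - m) (count + 1)
        | none => count                   -- unreachable: m ∈ deltas

def func_alt (answered : List Int) (needed : List Int) (q : Int) : Int :=
  let deltas := (needed.zip answered).map (fun p => p.1 - p.2)
  funcLoopB deltas.length deltas q 0

-- ===== PRECONDITION & SPEC =====
def Spec_func (answered : List Int) (needed : List Int) (q : Int) (out : Int) : Prop := out = func_alt answered needed q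
instance (answered : List Int) (needed : List Int) (q : Int) (out : Int) : Decidable (Spec_func answered needed q out) := by unfold Spec_func; infer_instance

-- ===== CLAIM (what is proved, stated in full; the proofs are below) =====
def Claim_equal_func : Prop := ∀ (answered : List Int) (needed : List Int) (q : Int), Dom_func answered needed q → Spec_func answered needed q (func answered needed q)

-- ===== LEMMAS AND PROOFS =====

-- The minimum goes first: sorted xs = min :: sorted (xs.erase min).
theorem sorted_eq_min_cons (xs : List Int) (m : Int)
    (hm : PySem.List.min? xs (fun x => x) = some m) :
    PySem.List.sorted xs (fun x => x) false
      = m :: PySem.List.sorted (xs.erase m) (fun x => x) false := by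
  have hmem : m ∈ xs := PySem.List.min?_mem hm
  have hmin : ∀ y ∈ xs, m ≤ y := by
    intro y hy; exact PySem.List.min?_isMin hm y hy
  apply PySem.List.sorted_id_eq_of_perm_of_pairwise
  · exact (List.Perm.cons m (PySem.List.sorted_perm _ _ _)).trans
      (List.perm_cons_erase hmem).symm
  · refine List.pairwise_cons.mpr ⟨?_, ?_⟩
    · intro y hy
      have : y ∈ xs.erase m := (PySem.List.mem_sorted _ _ _ _).1 hy
      exact hmin y (List.mem_of_mem_erase this)
    · exact PySem.List.sorted_pairwise _ _

-- B's selection loop computes the same as A's loop over the sorted list.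
theorem loopB_eq_loopA : ∀ (n : Nat) (xs : List Int), xs.length ≤ n → ∀ (q c : Int),
    funcLoopB n xs q c = funcLoopA (PySem.List.sorted xs (fun x => x) false) q c := by
  intro n
  induction n with
  | zero =>
    intro xs hlen q c
    have hxs : xs = [] := List.eq_nil_of_length_eq_zero (Nat.le_zero.mp hlen)
    subst hxs
    simp [funcLoopB, PySem.List.sorted, funcLoopA]
  | succ n ih =>
    intro xs hlen q c
    cases hmin : PySem.List.min? xs (fun x => x) with
    | none =>
      have hxs : xs = [] := (PySem.List.min?_eq_none_iff _ _).1 hmin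
      subst hxs
      simp [funcLoopB, hmin, funcLoopA, PySem.List.sorted]
    | some m =>
      have hmem : m ∈ xs := PySem.List.min?_mem hmin
      have hrem : PySem.List.remove? xs m = some (xs.erase m) :=
        PySem.List.remove?_eq_some_erase xs m hmem
      have hsorted := sorted_eq_min_cons xs m hmin
      rw [hsorted]
      simp only [funcLoopB, hmin, hrem, funcLoopA]
      by_cases hq : q < m
      · rw [if_pos hq, if_neg (by omega)]
      · rw [if_neg hq, if_pos (by omega)]
        exact ih (xs.erase m)
          (by have := List.length_erase_of_mem hmem; omega) (q - m) (c + 1)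

-- ===== VERDICT (by name: the statement is the Claim_ definition above) =====
theorem func_spec : Claim_equal_func := by
  intro answered needed q _
  unfold Spec_func func func_alt
  simp only []
  have hlist : (needed.zip answered).map (fun p => if p.1 ≥ p.1 then p.1 - p.2 else 0)
      = (needed.zip answered).map (fun p => p.1 - p.2) := by
    apply List.map_congr_left; intro p _; rw [if_pos (le_refl _)]
  rw [hlist, loopB_eq_loopA _ _ (le_refl _)]
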